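-- pv_equiv track=rewrite | github.com/caphael0925/CAPython | src/TextFileParser/CodecUtils.py | code2Decimal
-- ===== SOURCE A (Python) =====
-- DIGITMAP = '0123456789ABCDEFGHIJKLMNOPQRSTUVWXYZ'
--
-- DEC = len(DIGITMAP)
--
-- def code2Decimal(codestr):
--     digilist = list(codestr)
--     for i,digi in enumerate(digilist):
--         digilist[i] = DIGITMAP.find(digi)
--     digilist.reverse()
--
--     decnum = 0
--     for i,digi in enumerate(digilist):
--         decnum += digi * ( DEC ** i)
--
--     return decnum
-- ===== SOURCE B (Python) =====
-- DIGITMAP = '0123456789ABCDEFGHIJKLMNOPQRSTUVWXYZ'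
--
-- DEC = len(DIGITMAP)
--
-- def code2Decimal(codestr):
--     # Horner's method: one left-to-right pass, no list building, no powers.
--     decnum = 0
--     for digi in codestr:
--         decnum = decnum * DEC + DIGITMAP.find(digi)
--     return decnum
-- ===== Notes on version B (the rewrite author's own statement) =====
-- stated objective: faster
-- what changed: Replaced A's build-a-digit-list / reverse / sum-of-DEC**i passes with a single left-to-right Horner pass (decnum = decnum*DEC + digit), eliminating the big-power computations.
import Mathlib
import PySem

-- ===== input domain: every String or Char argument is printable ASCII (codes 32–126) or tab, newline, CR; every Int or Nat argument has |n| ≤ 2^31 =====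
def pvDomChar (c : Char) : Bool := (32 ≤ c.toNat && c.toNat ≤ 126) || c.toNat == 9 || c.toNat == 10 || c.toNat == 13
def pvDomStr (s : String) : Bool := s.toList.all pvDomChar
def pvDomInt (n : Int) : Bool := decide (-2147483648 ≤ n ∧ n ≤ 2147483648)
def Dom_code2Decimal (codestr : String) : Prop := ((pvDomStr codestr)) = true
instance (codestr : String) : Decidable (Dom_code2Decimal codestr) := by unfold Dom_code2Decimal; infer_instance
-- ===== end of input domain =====

-- B replaces A's map/reverse/power summation with a single Horner pass (same digit mapping, same value).


-- shared module constant: DIGITMAP.find(digi) for a single character digi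
def pvDigit (c : Char) : Int := PySem.Str.find "0123456789ABCDEFGHIJKLMNOPQRSTUVWXYZ" (String.singleton c)

-- ===== PORT A =====
-- list(codestr); replace each entry by DIGITMAP.find(digi); reverse; sum digi * DEC**i.
-- exponent i is the nonnegative enumerate index, so `.toNat` is exact here.
def code2Decimal (codestr : String) : Int :=
  let digilist : List Int := (codestr.toList).map pvDigit
  let digilist := digilist.reverse
  (PySem.List.enumerate digilist 0).foldl (fun decnum p => decnum + p.2 * (36 : Int) ^ p.1.toNat) 0

-- ===== PORT B =====
def code2Decimal_alt (codestr : String) : Int :=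
  codestr.toList.foldl (fun decnum digi => decnum * 36 + pvDigit digi) 0

-- ===== PRECONDITION & SPEC =====
def Spec_code2Decimal (codestr : String) (out : Int) : Prop := out = code2Decimal_alt codestr
instance (codestr : String) (out : Int) : Decidable (Spec_code2Decimal codestr out) := by unfold Spec_code2Decimal; infer_instance

-- ===== CLAIM (what is proved, stated in full; the proofs are below) =====
def Claim_equal_code2Decimal : Prop := ∀ (codestr : String), Dom_code2Decimal codestr → Spec_code2Decimal codestr (code2Decimal codestr)

-- ===== LEMMAS AND PROOFS =====

-- the positional-sum fold distributes over a constant added to its accumulator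
theorem pv_foldl_add_const (l : List (Int × Int)) (c x : Int) :
    l.foldl (fun a p => a + p.2 * (36 : Int) ^ p.1.toNat) (c + x)
      = l.foldl (fun a p => a + p.2 * (36 : Int) ^ p.1.toNat) c + x := by
  induction l generalizing c with
  | nil => rfl
  | cons p t ih =>
      simp only [List.foldl_cons]
      rw [show c + x + p.2 * (36:Int) ^ p.1.toNat = (c + p.2 * (36:Int) ^ p.1.toNat) + x by ring, ih]

-- Horner's rule: the left fold equals A's positional sum over the reversed digit list
theorem pv_horner_key (ds : List Int) (acc : Int) :
    ds.foldl (fun a d => a * 36 + d) acc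
      = (PySem.List.enumerate ds.reverse 0).foldl
          (fun a p => a + p.2 * (36 : Int) ^ p.1.toNat) (acc * (36 : Int) ^ ds.length) := by
  induction ds generalizing acc with
  | nil => simp
  | cons d t ih =>
      simp only [List.foldl_cons, List.reverse_cons, PySem.List.enumerate_append,
        List.foldl_append, List.length_cons]
      rw [ih (acc * 36 + d)]
      simp only [PySem.List.enumerate_cons, PySem.List.enumerate_nil, List.foldl_cons,
        List.foldl_nil, List.length_reverse]
      rw [show (acc * 36 + d) * (36:Int) ^ t.length
            = acc * (36:Int) ^ (t.length + 1) + d * (36:Int) ^ t.length by ring,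
          pv_foldl_add_const]
      norm_num [Int.toNat_natCast]

-- ===== VERDICT (by name: the statement is the Claim_ definition above) =====
theorem code2Decimal_spec : Claim_equal_code2Decimal := by
  intro codestr _
  show code2Decimal codestr = code2Decimal_alt codestr
  unfold code2Decimal code2Decimal_alt
  rw [← List.foldl_map (f := pvDigit) (g := fun a d => a * 36 + d)]
  rw [pv_horner_key]
  simp
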